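-- pv_equiv track=rewrite | github.com/elisabetj/forritun_lausnir | assignments/07_functions/a07p01lexicographicalorder/alternative_correct_solutions/manual_loop_while_alternative.py | precedes
-- ===== SOURCE A (Python) =====
-- def precedes(first: str, second: str) -> str:
--     """Returns the string that comes first in lexicographical order.
--
--     Ignores case.
--     """
--
--     index = 0
--     while index < len(first) and index < len(second):
--         # Take care not to index out of bounds of either string.
--         letter_in_first = first[index].lower()
--         letter_in_second = second[index].lower()
--
--         if letter_in_first < letter_in_second:
--             return first
--         elif letter_in_second < letter_in_first:
--             return second
--
--         index += 1
--
--     if len(first) < len(second):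
--         return first
--
--     return second
-- ===== SOURCE B (Python) =====
-- def precedes(first: str, second: str) -> str:
--     """Returns the string that comes first in lexicographical order.
--
--     Ignores case.
--     """
--     return first if first.lower() < second.lower() else second
-- ===== Notes on version B (the rewrite author's own statement) =====
-- stated objective: idiomatic
-- what changed: Replaces the index-bookkeeping while loop and length tie-break with one closed-form strict comparison of the whole lowercased strings.
import Mathlib
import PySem

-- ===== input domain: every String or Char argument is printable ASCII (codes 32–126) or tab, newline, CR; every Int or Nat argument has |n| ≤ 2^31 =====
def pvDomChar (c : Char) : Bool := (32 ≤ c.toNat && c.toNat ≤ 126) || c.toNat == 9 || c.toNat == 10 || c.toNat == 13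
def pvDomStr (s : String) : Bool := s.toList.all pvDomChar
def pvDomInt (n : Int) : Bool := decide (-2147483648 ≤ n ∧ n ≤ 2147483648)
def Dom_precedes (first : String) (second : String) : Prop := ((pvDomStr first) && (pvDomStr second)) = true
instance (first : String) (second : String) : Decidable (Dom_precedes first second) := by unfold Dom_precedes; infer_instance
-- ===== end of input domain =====

-- B replaces A's index-by-index while loop with one strict comparison of the whole lowercased strings (more idiomatic).

-- ===== PORT A =====
-- The while loop walks both strings at the same index; ported as the obvious
-- structural recursion over the two suffixes at that index (heads = first[index], second[index]).
-- first[index].lower() on one char = PySem.Chars.lowerChar (exact on the ASCII domain).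
def precedesLoop (first : String) (second : String) : List Char → List Char → String
  | a :: as, b :: bs =>
    let letterInFirst := PySem.Chars.lowerChar a
    let letterInSecond := PySem.Chars.lowerChar b
    if letterInFirst < letterInSecond then first
    else if letterInSecond < letterInFirst then second
    else precedesLoop first second as bs
  | _, _ =>
    if PySem.Str.len first < PySem.Str.len second then first else second

def precedes (first : String) (second : String) : String :=
  precedesLoop first second first.toList second.toList

-- ===== PORT B =====
def precedes_alt (first : String) (second : String) : String :=
  if PySem.Str.lower first < PySem.Str.lower second then first else second

-- ===== PRECONDITION & SPEC =====
def Spec_precedes (first : String) (second : String) (out : String) : Prop := out = precedes_alt first second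
instance (first : String) (second : String) (out : String) : Decidable (Spec_precedes first second out) := by unfold Spec_precedes; infer_instance

-- ===== CLAIM (what is proved, stated in full; the proofs are below) =====
def Claim_equal_precedes : Prop := ∀ (first : String) (second : String), Dom_precedes first second → Spec_precedes first second (precedes first second)

-- ===== LEMMAS AND PROOFS =====

theorem lower_cons (a : Char) (as : List Char) :
    PySem.Chars.lower (a :: as) = PySem.Chars.lowerChar a :: PySem.Chars.lower as := by
  simp [PySem.Chars.lower]

theorem precedesLoop_eq (first second : String) (as bs : List Char)
    (hinv : (as.length < bs.length) ↔ (PySem.Str.len first < PySem.Str.len second)) :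
    precedesLoop first second as bs =
      if PySem.Chars.lower as < PySem.Chars.lower bs then first else second := by
  induction as generalizing bs with
  | nil =>
    cases bs with
    | nil =>
      have hlen : ¬ PySem.Str.len first < PySem.Str.len second := hinv.not.mp (by omega)
      rw [show precedesLoop first second [] [] =
            (if PySem.Str.len first < PySem.Str.len second then first else second) from rfl,
        if_neg hlen, if_neg (by simp [PySem.Chars.lower])]
    | cons b bs =>
      have hlen : PySem.Str.len first < PySem.Str.len second := hinv.mp (by simp)
      rw [show precedesLoop first second [] (b :: bs) =
            (if PySem.Str.len first < PySem.Str.len second then first else second) from rfl,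
        if_pos hlen, if_pos (by simp [PySem.Chars.lower, List.nil_lt_cons])]
  | cons a as ih =>
    cases bs with
    | nil =>
      have hlen : ¬ PySem.Str.len first < PySem.Str.len second := hinv.not.mp (by simp)
      rw [show precedesLoop first second (a :: as) [] =
            (if PySem.Str.len first < PySem.Str.len second then first else second) from rfl,
        if_neg hlen, if_neg (by simp [PySem.Chars.lower])]
    | cons b bs =>
      rw [show precedesLoop first second (a :: as) (b :: bs) =
            (if PySem.Chars.lowerChar a < PySem.Chars.lowerChar b then first
             else if PySem.Chars.lowerChar b < PySem.Chars.lowerChar a then second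
             else precedesLoop first second as bs) from rfl,
        lower_cons, lower_cons]
      rcases lt_trichotomy (PySem.Chars.lowerChar a) (PySem.Chars.lowerChar b) with h | h | h
      · rw [if_pos h, if_pos (List.cons_lt_cons_iff.mpr (Or.inl h))]
      · have hlt : ¬ PySem.Chars.lowerChar a < PySem.Chars.lowerChar b := by simp [h]
        have hgt : ¬ PySem.Chars.lowerChar b < PySem.Chars.lowerChar a := by simp [h]
        have hinv' : (as.length < bs.length) ↔ (PySem.Str.len first < PySem.Str.len second) := by
          simp only [List.length_cons] at hinv; omega
        rw [if_neg hlt, if_neg hgt, ih bs hinv']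
        by_cases htail : (PySem.Chars.lower as) < (PySem.Chars.lower bs)
        · rw [if_pos htail, if_pos (List.cons_lt_cons_iff.mpr (Or.inr ⟨h, htail⟩))]
        · rw [if_neg htail, if_neg]
          intro hc
          rcases List.cons_lt_cons_iff.mp hc with h' | ⟨_, h'⟩
          · exact absurd h' (by simp [h])
          · exact htail h'
      · have hlt : ¬ PySem.Chars.lowerChar a < PySem.Chars.lowerChar b := not_lt_of_gt h
        rw [if_neg hlt, if_pos h, if_neg]
        intro hc
        rcases List.cons_lt_cons_iff.mp hc with h' | ⟨h', _⟩
        · exact absurd h (not_lt_of_gt h')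
        · exact absurd h' (ne_of_gt h)

-- ===== VERDICT (by name: the statement is the Claim_ definition above) =====
theorem precedes_spec : Claim_equal_precedes := by
  intro first second _
  unfold Spec_precedes precedes precedes_alt
  rw [precedesLoop_eq]
  · have hf := PySem.Str.toList_lower first
    have hs := PySem.Str.toList_lower second
    by_cases h : PySem.Str.lower first < PySem.Str.lower second
    · rw [if_pos h, if_pos]
      rw [String.lt_iff_toList_lt] at h
      rwa [hf, hs] at h
    · rw [if_neg h, if_neg]
      rw [String.lt_iff_toList_lt] at h
      rwa [hf, hs] at h
  · simp [PySem.Str.len]
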